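-- pv_equiv track=rewrite | github.com/DiegoJavOlivera/techSolution | validaciones.py | validar_cantidad_proyectos
-- ===== SOURCE A (Python) =====
-- def validar_cantidad_proyectos(lista_proyectos:list[dict]):
--     contador_proyectos = 0
--     for empleados in lista_proyectos:
--         contador_proyectos = contador_proyectos + 1
--
--     if contador_proyectos < 50:
--         return True
--     else:
--         return False
-- ===== SOURCE B (Python) =====
-- def validar_cantidad_proyectos(lista_proyectos: list[dict]):
--     return len(lista_proyectos) < 50
-- ===== Notes on version B (the rewrite author's own statement) =====
-- stated objective: idiomatic
-- what changed: Replaces the element-by-element counting loop plus if/else True/False branch with a single len() comparison returned directly.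
import Mathlib
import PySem

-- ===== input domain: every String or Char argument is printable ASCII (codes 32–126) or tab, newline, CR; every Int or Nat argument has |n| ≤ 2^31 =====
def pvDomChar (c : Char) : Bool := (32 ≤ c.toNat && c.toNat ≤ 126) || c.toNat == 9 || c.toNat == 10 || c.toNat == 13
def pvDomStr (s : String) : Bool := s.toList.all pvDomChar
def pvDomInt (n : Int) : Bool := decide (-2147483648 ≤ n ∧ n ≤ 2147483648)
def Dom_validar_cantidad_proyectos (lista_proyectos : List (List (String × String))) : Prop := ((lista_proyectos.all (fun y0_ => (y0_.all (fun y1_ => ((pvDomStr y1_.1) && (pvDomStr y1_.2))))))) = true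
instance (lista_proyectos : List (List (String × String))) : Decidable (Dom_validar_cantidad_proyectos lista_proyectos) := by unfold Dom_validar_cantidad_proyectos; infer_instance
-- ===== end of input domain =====

-- B replaces A's counting loop and if/else with a direct length comparison (idiomatic).


-- ===== PORT A =====
-- Literal port of A: foldl accumulating a counter, then an if/else returning True/False.
def validar_cantidad_proyectos (lista_proyectos : List (List (String × String))) : Bool :=
  let contador_proyectos : Int :=
    lista_proyectos.foldl (fun contador_proyectos _empleados => contador_proyectos + 1) 0
  if contador_proyectos < 50 then true else false

-- ===== PORT B =====
-- Port of B: direct length comparison.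
def validar_cantidad_proyectos_alt (lista_proyectos : List (List (String × String))) : Bool :=
  decide ((lista_proyectos.length : Int) < 50)

-- ===== PRECONDITION & SPEC =====
def Spec_validar_cantidad_proyectos (lista_proyectos : List (List (String × String))) (out : Bool) : Prop := out = validar_cantidad_proyectos_alt lista_proyectos
instance (lista_proyectos : List (List (String × String))) (out : Bool) : Decidable (Spec_validar_cantidad_proyectos lista_proyectos out) := by unfold Spec_validar_cantidad_proyectos; infer_instance

-- ===== CLAIM (what is proved, stated in full; the proofs are below) =====
def Claim_equal_validar_cantidad_proyectos : Prop := ∀ (lista_proyectos : List (List (String × String))), Dom_validar_cantidad_proyectos lista_proyectos → Spec_validar_cantidad_proyectos lista_proyectos (validar_cantidad_proyectos lista_proyectos)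

-- ===== LEMMAS AND PROOFS =====

-- ===== VERDICT (by name: the statement is the Claim_ definition above) =====
-- counting fold equals length
theorem pv_count_eq_length (xs : List (List (String × String))) (a : Int) :
    xs.foldl (fun c (_ : List (String × String)) => c + 1) a = a + xs.length := by
  induction xs generalizing a with
  | nil => simp
  | cons x xs ih => simp [List.foldl, ih]; omega

theorem validar_cantidad_proyectos_spec : Claim_equal_validar_cantidad_proyectos := by
  intro l _
  unfold Spec_validar_cantidad_proyectos validar_cantidad_proyectos validar_cantidad_proyectos_alt
  simp [pv_count_eq_length]
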